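-- pv_equiv track=rewrite | github.com/ducfilan/algorithms-practice | Graph/sum_all_path2D.py | sum_all_path2D
-- ===== SOURCE A (Python) =====
-- def sum_all_path2D(n, a):
--     if not a:
--         return 0
--
--     if not a[0]:
--         return 0
--
--     dp = [[0 for i in range(n)] for j in range(n)]
--     paths_count = [[0 for i in range(n)] for j in range(n)]
--
--     dp[0][0] = a[0][0]
--
--     for i in range(1, n):
--         dp[0][i] = dp[0][i - 1] + a[0][i]
--         paths_count[0][i] += 1
--
--     for j in range(1, n):
--         dp[j][0] = dp[j - 1][0] + a[j][0]
--         paths_count[j][0] += 1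
--
--     for i in range(1, n):
--         for j in range(1, n):
--             paths_count[i][j] += paths_count[i][j - 1] + paths_count[i - 1][j]
--             dp[i][j] += a[i][j] * paths_count[i][j] + dp[i][j - 1] + dp[i - 1][j]
--
--     return dp[n - 1][n - 1] % 1000000007
-- ===== SOURCE B (Python) =====
-- def sum_all_path2D(n, a):
--     if not a:
--         return 0
--     if not a[0]:
--         return 0
--     fact = [1]
--     for t in range(2 * n - 2):
--         fact.append(fact[-1] * (t + 1))
--     m = 2 * (n - 1)
--     total = 0
--     for i in range(n):
--         for j in range(n):
--             total += a[i][j] \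
--                 * (fact[i + j] // (fact[i] * fact[j])) \
--                 * (fact[m - i - j] // (fact[n - 1 - i] * fact[n - 1 - j]))
--     return total % 1000000007
-- ===== Notes on version B (the rewrite author's own statement) =====
-- stated objective: alternative
-- what changed: Replaces the two n-by-n DP tables (dp and paths_count) filled by three mutation loop phases with the closed-form sum a[i][j]*C(i+j,i)*C(2(n-1)-i-j,n-1-i) over all cells, computed from one precomputed factorial table.
import Mathlib
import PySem

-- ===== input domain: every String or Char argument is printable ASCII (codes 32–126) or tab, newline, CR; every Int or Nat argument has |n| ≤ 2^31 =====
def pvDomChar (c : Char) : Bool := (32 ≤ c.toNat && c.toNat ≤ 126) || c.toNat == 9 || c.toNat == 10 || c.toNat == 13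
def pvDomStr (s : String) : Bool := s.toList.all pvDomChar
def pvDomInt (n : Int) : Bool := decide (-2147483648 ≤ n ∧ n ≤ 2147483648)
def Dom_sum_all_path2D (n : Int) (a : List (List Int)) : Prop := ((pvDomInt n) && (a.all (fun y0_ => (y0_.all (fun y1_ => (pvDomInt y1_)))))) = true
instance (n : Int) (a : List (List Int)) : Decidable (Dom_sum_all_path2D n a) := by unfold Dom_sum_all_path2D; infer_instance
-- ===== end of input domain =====

-- B replaces A's two n×n DP tables and three mutation loops by the closed-form sum
-- Σ a[i][j]·C(i+j,i)·C(2(n-1)-i-j, n-1-i) over a precomputed factorial table (alternative algorithm).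

-- ===== PORT A =====

def pvGet2 (m : List (List Int)) (i j : Int) : Int :=
  PySem.List.pyGetD (PySem.List.pyGetD m i []) j 0

def pvSet2 (m : List (List Int)) (i j : Int) (v : Int) : List (List Int) :=
  PySem.List.pySetD m i (PySem.List.pySetD (PySem.List.pyGetD m i []) j v)

def pvStep1 (a : List (List Int)) (s : List (List Int) × List (List Int)) (i : Int) :
    List (List Int) × List (List Int) :=
  (pvSet2 s.1 0 i (pvGet2 s.1 0 (i - 1) + pvGet2 a 0 i),
   pvSet2 s.2 0 i (pvGet2 s.2 0 i + 1))

def pvStep2 (a : List (List Int)) (s : List (List Int) × List (List Int)) (j : Int) :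
    List (List Int) × List (List Int) :=
  (pvSet2 s.1 j 0 (pvGet2 s.1 (j - 1) 0 + pvGet2 a j 0),
   pvSet2 s.2 j 0 (pvGet2 s.2 j 0 + 1))

def pvStep3Inner (a : List (List Int)) (i : Int) (t : List (List Int) × List (List Int)) (j : Int) :
    List (List Int) × List (List Int) :=
  let pc' := pvSet2 t.2 i j (pvGet2 t.2 i j + pvGet2 t.2 i (j - 1) + pvGet2 t.2 (i - 1) j)
  (pvSet2 t.1 i j (pvGet2 t.1 i j + pvGet2 a i j * pvGet2 pc' i j + pvGet2 t.1 i (j - 1) + pvGet2 t.1 (i - 1) j),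
   pc')

def pvStep3 (a : List (List Int)) (n : Int) (s : List (List Int) × List (List Int)) (i : Int) :
    List (List Int) × List (List Int) :=
  (PySem.List.pyRange 1 n 1).foldl (pvStep3Inner a i) s

def sum_all_path2D (n : Int) (a : List (List Int)) : Int :=
  if a = [] then 0
  else if a.headI = [] then 0
  else
    let dp0 := (PySem.List.pyRange 0 n 1).map (fun _ => (PySem.List.pyRange 0 n 1).map (fun _ => (0 : Int)))
    let pc0 := (PySem.List.pyRange 0 n 1).map (fun _ => (PySem.List.pyRange 0 n 1).map (fun _ => (0 : Int)))
    let dp1 := pvSet2 dp0 0 0 (pvGet2 a 0 0)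
    let s2 := (PySem.List.pyRange 1 n 1).foldl (pvStep1 a) (dp1, pc0)
    let s3 := (PySem.List.pyRange 1 n 1).foldl (pvStep2 a) s2
    let s4 := (PySem.List.pyRange 1 n 1).foldl (pvStep3 a n) s3
    PySem.Int.mod (pvGet2 s4.1 (n - 1) (n - 1)) 1000000007

-- ===== PORT B =====

def pvFactStep (f : List Int) (t : Int) : List Int :=
  f ++ [PySem.List.pyGetD f (-1) 0 * (t + 1)]

def sum_all_path2D_alt (n : Int) (a : List (List Int)) : Int :=
  if a = [] then 0
  else if a.headI = [] then 0
  else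
    let fact := (PySem.List.pyRange 0 (2 * n - 2) 1).foldl pvFactStep [(1 : Int)]
    let m := 2 * (n - 1)
    let total := (PySem.List.pyRange 0 n 1).foldl (fun acc i =>
        (PySem.List.pyRange 0 n 1).foldl (fun acc j =>
          acc + pvGet2 a i j
            * PySem.Int.floordiv (PySem.List.pyGetD fact (i + j) 0)
                (PySem.List.pyGetD fact i 0 * PySem.List.pyGetD fact j 0)
            * PySem.Int.floordiv (PySem.List.pyGetD fact (m - i - j) 0)
                (PySem.List.pyGetD fact (n - 1 - i) 0 * PySem.List.pyGetD fact (n - 1 - j) 0)) acc) 0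
    PySem.Int.mod total 1000000007

-- ===== PRECONDITION & SPEC =====
-- Pre_ excludes exactly the inputs where A raises IndexError: n ≤ 0 with a non-degenerate grid
-- (the empty n×n table is indexed), or a grid with fewer than n rows or a row shorter than n.
def Pre_sum_all_path2D (n : Int) (a : List (List Int)) : Prop :=
  a = [] ∨ a.headI = [] ∨
    (1 ≤ n ∧ n ≤ (a.length : Int) ∧ ∀ r ∈ a.take n.toNat, n ≤ (r.length : Int))
instance (n : Int) (a : List (List Int)) : Decidable (Pre_sum_all_path2D n a) := by
  unfold Pre_sum_all_path2D; infer_instance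

def pvWitness_sum_all_path2D : Int × List (List Int) := (2, [[1, 2], [3, 4]])

def Spec_sum_all_path2D (n : Int) (a : List (List Int)) (out : Int) : Prop := out = sum_all_path2D_alt n a
instance (n : Int) (a : List (List Int)) (out : Int) : Decidable (Spec_sum_all_path2D n a out) := by unfold Spec_sum_all_path2D; infer_instance

-- ===== CLAIM (what is proved, stated in full; the proofs are below) =====
def Claim_equal_sum_all_path2D : Prop := ∀ (n : Int) (a : List (List Int)), Dom_sum_all_path2D n a → Pre_sum_all_path2D n a → Spec_sum_all_path2D n a (sum_all_path2D n a)

-- ===== LEMMAS AND PROOFS =====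

def pvG (a : List (List Int)) (p q : ℕ) : Int := (a.getD p []).getD q 0

def pvPc : ℕ → ℕ → Int
  | 0, 0 => 0
  | 0, _ + 1 => 1
  | _ + 1, 0 => 1
  | i + 1, j + 1 => pvPc (i + 1) j + pvPc i (j + 1)
termination_by i j => i + j

def pvD (a : List (List Int)) : ℕ → ℕ → Int
  | 0, 0 => pvG a 0 0
  | 0, j + 1 => pvD a 0 j + pvG a 0 (j + 1)
  | i + 1, 0 => pvD a i 0 + pvG a (i + 1) 0
  | i + 1, j + 1 => pvG a (i + 1) (j + 1) * pvPc (i + 1) (j + 1) + pvD a (i + 1) j + pvD a i (j + 1)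
termination_by i j => i + j

def pvRep (N : ℕ) (m : List (List Int)) (f : ℕ → ℕ → Int) : Prop :=
  m.length = N ∧ (∀ r ∈ m, r.length = N) ∧ ∀ p q : ℕ, p < N → q < N → pvGet2 m (↑p) (↑q) = f p q

theorem pvRep_congr {N : ℕ} {m : List (List Int)} {f g : ℕ → ℕ → Int}
    (h : pvRep N m f) (hfg : ∀ p q, p < N → q < N → f p q = g p q) : pvRep N m g := by
  refine ⟨h.1, h.2.1, fun p q hp hq => ?_⟩
  rw [h.2.2 p q hp hq, hfg p q hp hq]

theorem getD_set {α : Type} (l : List α) (n k : ℕ) (x : α) (d : α) (hn : n < l.length) :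
    (l.set n x).getD k d = if k = n then x else l.getD k d := by
  by_cases hk : k = n
  · subst hk
    rw [List.getD_eq_getElem _ d (by simpa using hn), List.getElem_set_self]
    simp
  · by_cases hkl : k < l.length
    · rw [List.getD_eq_getElem _ d (by simpa using hkl), List.getD_eq_getElem _ d hkl,
        List.getElem_set_ne (by omega), if_neg hk]
    · rw [if_neg hk, List.getD_eq_default _ d (by simpa using (not_lt.mp hkl)),
        List.getD_eq_default _ d (by omega)]

theorem pvGet2_natCast (m : List (List Int)) (p q : ℕ) :
    pvGet2 m (↑p) (↑q) = (m.getD p []).getD q 0 := by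
  simp only [pvGet2, PySem.List.pyGetD_natCast]

theorem pvRep_set {N : ℕ} {m : List (List Int)} {f : ℕ → ℕ → Int}
    (h : pvRep N m f) {i j : ℕ} (hi : i < N) (hj : j < N) (v : Int) :
    pvRep N (pvSet2 m (↑i) (↑j) v) (fun p q => if p = i ∧ q = j then v else f p q) := by
  obtain ⟨hlen, hrows, hget⟩ := h
  have hrowi : (m.getD i []).length = N := by
    have hlt : i < m.length := by omega
    rw [List.getD_eq_getElem m [] hlt]
    exact hrows _ (List.getElem_mem hlt)
  have hset2 : pvSet2 m (↑i) (↑j) v = m.set i ((m.getD i []).set j v) := by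
    simp only [pvSet2, PySem.List.pySetD_natCast, PySem.List.pyGetD_natCast]
  rw [hset2]
  refine ⟨by simpa using hlen, ?_, ?_⟩
  · intro r hr
    rcases List.mem_or_eq_of_mem_set hr with h' | h'
    · exact hrows r h'
    · rw [h']; simpa using hrowi
  · intro p q hp hq
    rw [pvGet2_natCast, getD_set m i p _ [] (by omega)]
    by_cases hpi : p = i
    · rw [if_pos hpi, getD_set _ j q v 0 (by omega)]
      by_cases hqj : q = j
      · simp [hpi, hqj]
      · rw [if_neg hqj]
        have := hget p q hp hq
        rw [pvGet2_natCast] at this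
        simp only [hqj, and_false, if_false]
        rw [← this, hpi]
    · rw [if_neg hpi]
      have := hget p q hp hq
      rw [pvGet2_natCast] at this
      simp only [hpi, false_and, if_false]
      exact this

theorem pvFoldInv {S : Type} (step : S → Int → S) (Inv : ℕ → S → Prop) (s0 : S) (K : ℕ)
    (base : Inv 0 s0)
    (ind : ∀ k s, k < K → Inv k s → Inv (k + 1) (step s (↑(k + 1)))) :
    ∀ k, k ≤ K → Inv k ((PySem.List.pyRange 1 ((k : Int) + 1) 1).foldl step s0) := by
  intro k
  induction k with
  | zero =>
    intro _
    rw [show ((0:ℕ):Int) + 1 = 1 by norm_num, PySem.List.pyRange_one_eq_nil (by norm_num)]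
    exact base
  | succ k ih =>
    intro hk
    have h1 : ((k + 1 : ℕ) : Int) + 1 = ((k : Int) + 1) + 1 := by push_cast; ring
    rw [h1, PySem.List.pyRange_one_succ_right (by omega), List.foldl_append]
    simp only [List.foldl_cons, List.foldl_nil]
    rw [show ((k : Int) + 1) = ((k + 1 : ℕ) : Int) by push_cast; ring]
    exact ind k _ (by omega) (ih (by omega))

theorem pvFoldInv0 {S : Type} (step : S → Int → S) (Inv : ℕ → S → Prop) (s0 : S) (K : ℕ)
    (base : Inv 0 s0)
    (ind : ∀ k s, k < K → Inv k s → Inv (k + 1) (step s (↑k))) :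
    ∀ k, k ≤ K → Inv k ((PySem.List.pyRange 0 (k : Int) 1).foldl step s0) := by
  intro k
  induction k with
  | zero =>
    intro _
    rw [show ((0:ℕ):Int) = 0 by norm_num, PySem.List.pyRange_one_eq_nil (by norm_num)]
    exact base
  | succ k ih =>
    intro hk
    have h1 : ((k + 1 : ℕ) : Int) = (k : Int) + 1 := by push_cast; ring
    rw [h1, PySem.List.pyRange_one_succ_right (by omega), List.foldl_append]
    simp only [List.foldl_cons, List.foldl_nil]
    exact ind k _ (by omega) (ih (by omega))

theorem pvRep_get {N : ℕ} {m : List (List Int)} {f : ℕ → ℕ → Int} (h : pvRep N m f)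
    {i j : Int} {p q : ℕ} (hip : i = ↑p) (hjq : j = ↑q) (hp : p < N) (hq : q < N) :
    pvGet2 m i j = f p q := by
  subst hip; subst hjq; exact h.2.2 p q hp hq

theorem pvRep_set' {N : ℕ} {m : List (List Int)} {f : ℕ → ℕ → Int} (h : pvRep N m f)
    {i j : Int} {ip jp : ℕ} (hi : i = ↑ip) (hj : j = ↑jp) (hip : ip < N) (hjp : jp < N) (v : Int) :
    pvRep N (pvSet2 m i j v) (fun p q => if p = ip ∧ q = jp then v else f p q) := by
  subst hi; subst hj; exact pvRep_set h hip hjp v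

theorem pvGet2_grid (a : List (List Int)) {i j : Int} {p q : ℕ} (hip : i = ↑p) (hjq : j = ↑q) :
    pvGet2 a i j = pvG a p q := by
  subst hip; subst hjq; rw [pvGet2_natCast]; rfl

theorem pvStage1 (a : List (List Int)) (N : ℕ) (hN : 1 ≤ N) (st : List (List Int) × List (List Int))
    (hdp : pvRep N st.1 (fun p q => if p = 0 ∧ q = 0 then pvG a 0 0 else 0))
    (hpc : pvRep N st.2 (fun _ _ => 0)) (K : ℕ) (hK : K ≤ N - 1) :
    pvRep N (((PySem.List.pyRange 1 ((K : Int) + 1) 1).foldl (pvStep1 a) st).1)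
      (fun p q => if p = 0 ∧ q ≤ K then pvD a 0 q else 0) ∧
    pvRep N (((PySem.List.pyRange 1 ((K : Int) + 1) 1).foldl (pvStep1 a) st).2)
      (fun p q => if p = 0 ∧ 1 ≤ q ∧ q ≤ K then 1 else 0) := by
  refine pvFoldInv _ (fun k s =>
      pvRep N s.1 (fun p q => if p = 0 ∧ q ≤ k then pvD a 0 q else 0) ∧
      pvRep N s.2 (fun p q => if p = 0 ∧ 1 ≤ q ∧ q ≤ k then 1 else 0)) st K ?_ ?_ K le_rfl
  · constructor
    · refine pvRep_congr hdp ?_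
      intro p q _ _
      by_cases h0 : p = 0 ∧ q = 0
      · obtain ⟨h1, h2⟩ := h0; subst h1; subst h2; simp [pvD]
      · have : ¬ (p = 0 ∧ q ≤ 0) := by omega
        simp [h0]
    · refine pvRep_congr hpc ?_
      intro p q _ _
      have : ¬ (p = 0 ∧ 1 ≤ q ∧ q ≤ 0) := by omega
      simp only [this, if_false]
  · rintro k ⟨sdp, spc⟩ hk ⟨h1, h2⟩
    have hk1N : k + 1 < N := by omega
    have e1 : ((k + 1 : ℕ) : Int) - 1 = ((k : ℕ) : Int) := by push_cast; ring
    have e0 : (0 : Int) = ((0 : ℕ) : Int) := rfl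
    constructor
    · simp only [pvStep1]
      rw [pvRep_get h1 e0 e1 (by omega) (by omega),
        pvGet2_grid a e0 rfl]
      have hval : (if (0 : ℕ) = 0 ∧ k ≤ k then pvD a 0 k else 0) + pvG a 0 (k + 1)
          = pvD a 0 (k + 1) := by simp [pvD]
      rw [hval]
      refine pvRep_congr (pvRep_set' h1 e0 rfl (by omega) hk1N _) ?_
      intro p q hp hq
      by_cases hc : p = 0 ∧ q = k + 1
      · obtain ⟨hp0, hq1⟩ := hc; subst hp0; subst hq1; simp
      · have : (p = 0 ∧ q ≤ k + 1) ↔ (p = 0 ∧ q ≤ k) := by omega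
        simp [hc, this]
    · simp only [pvStep1]
      rw [pvRep_get h2 e0 rfl (by omega) hk1N]
      have hcond : ¬ ((0:ℕ) = 0 ∧ 1 ≤ k + 1 ∧ k + 1 ≤ k) := by omega
      have hval : (if (0:ℕ) = 0 ∧ 1 ≤ k + 1 ∧ k + 1 ≤ k then (1:Int) else 0) + 1 = 1 := by
        simp
      rw [hval]
      refine pvRep_congr (pvRep_set' h2 e0 rfl (by omega) hk1N _) ?_
      intro p q hp hq
      by_cases hc : p = 0 ∧ q = k + 1
      · obtain ⟨hp0, hq1⟩ := hc; subst hp0; subst hq1; simp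
      · have : (p = 0 ∧ 1 ≤ q ∧ q ≤ k + 1) ↔ (p = 0 ∧ 1 ≤ q ∧ q ≤ k) := by omega
        simp [hc, this]

theorem pvStage2 (a : List (List Int)) (N : ℕ) (hN : 1 ≤ N) (st : List (List Int) × List (List Int))
    (hdp : pvRep N st.1 (fun p q => if p = 0 then pvD a 0 q else 0))
    (hpc : pvRep N st.2 (fun p q => if p = 0 ∧ 1 ≤ q then 1 else 0)) (K : ℕ) (hK : K ≤ N - 1) :
    pvRep N (((PySem.List.pyRange 1 ((K : Int) + 1) 1).foldl (pvStep2 a) st).1)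
      (fun p q => if p = 0 then pvD a 0 q else if q = 0 ∧ p ≤ K then pvD a p 0 else 0) ∧
    pvRep N (((PySem.List.pyRange 1 ((K : Int) + 1) 1).foldl (pvStep2 a) st).2)
      (fun p q => if p = 0 ∧ 1 ≤ q then 1 else if q = 0 ∧ 1 ≤ p ∧ p ≤ K then 1 else 0) := by
  refine pvFoldInv _ (fun k s =>
      pvRep N s.1 (fun p q => if p = 0 then pvD a 0 q else if q = 0 ∧ p ≤ k then pvD a p 0 else 0) ∧
      pvRep N s.2 (fun p q => if p = 0 ∧ 1 ≤ q then 1 else if q = 0 ∧ 1 ≤ p ∧ p ≤ k then 1 else 0))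
      st K ?_ ?_ K le_rfl
  · constructor
    · refine pvRep_congr hdp ?_
      intro p q _ _
      by_cases h0 : p = 0
      · simp [h0]
      · have : ¬ (q = 0 ∧ p ≤ 0) := by omega
        simp only [h0, this, if_false]
    · refine pvRep_congr hpc ?_
      intro p q _ _
      by_cases h0 : p = 0 ∧ 1 ≤ q
      · simp [h0]
      · have : ¬ (q = 0 ∧ 1 ≤ p ∧ p ≤ 0) := by omega
        simp only [h0, this, if_false]
  · rintro k ⟨sdp, spc⟩ hk ⟨h1, h2⟩
    have hk1N : k + 1 < N := by omega
    have e1 : ((k + 1 : ℕ) : Int) - 1 = ((k : ℕ) : Int) := by push_cast; ring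
    have e0 : (0 : Int) = ((0 : ℕ) : Int) := rfl
    constructor
    · simp only [pvStep2]
      rw [pvRep_get h1 e1 e0 (by omega) (by omega), pvGet2_grid a rfl e0]
      have hval : (if k = 0 then pvD a 0 0 else if (0:ℕ) = 0 ∧ k ≤ k then pvD a k 0 else 0)
          + pvG a (k + 1) 0 = pvD a (k + 1) 0 := by
        by_cases hk0 : k = 0
        · subst hk0; simp [pvD]
        · simp only [hk0, if_false]
          simp [pvD]
      rw [hval]
      refine pvRep_congr (pvRep_set' h1 rfl e0 hk1N (by omega) _) ?_
      intro p q hp hq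
      by_cases hc : p = k + 1 ∧ q = 0
      · obtain ⟨hp1, hq0⟩ := hc; subst hp1; subst hq0
        have h1' : ¬ ((k + 1:ℕ) = 0) := by omega
        have h2' : ((0:ℕ) = 0 ∧ k + 1 ≤ k + 1) := by omega
        simp only [h1', if_false]
        simp
      · by_cases hp0 : p = 0
        · simp [hp0]
        · have : (q = 0 ∧ p ≤ k + 1) ↔ (q = 0 ∧ p ≤ k) := by omega
          simp only [hc, if_false, hp0, this]
    · simp only [pvStep2]
      rw [pvRep_get h2 rfl e0 hk1N (by omega)]
      have hcond1 : ¬ ((k + 1 : ℕ) = 0 ∧ 1 ≤ (0:ℕ)) := by omega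
      have hcond2 : ¬ ((0:ℕ) = 0 ∧ 1 ≤ k + 1 ∧ k + 1 ≤ k) := by omega
      have hval : (if (k + 1 : ℕ) = 0 ∧ 1 ≤ (0:ℕ) then (1:Int)
          else if (0:ℕ) = 0 ∧ 1 ≤ k + 1 ∧ k + 1 ≤ k then 1 else 0) + 1 = 1 := by
        rw [if_neg hcond1, if_neg hcond2]; norm_num
      rw [hval]
      refine pvRep_congr (pvRep_set' h2 rfl e0 hk1N (by omega) _) ?_
      intro p q hp hq
      by_cases hc : p = k + 1 ∧ q = 0
      · obtain ⟨hp1, hq0⟩ := hc; subst hp1; subst hq0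
        have h1' : ¬ ((k + 1:ℕ) = 0 ∧ 1 ≤ (0:ℕ)) := by omega
        have h2' : ((0:ℕ) = 0 ∧ 1 ≤ k + 1 ∧ k + 1 ≤ k + 1) := by omega
        simp only [h1', if_false]
        simp
      · by_cases hp0 : p = 0 ∧ 1 ≤ q
        · simp [hp0]
        · have : (q = 0 ∧ 1 ≤ p ∧ p ≤ k + 1) ↔ (q = 0 ∧ 1 ≤ p ∧ p ≤ k) := by omega
          simp only [hc, if_false, hp0, this]

theorem pvStage3Inner (a : List (List Int)) (N : ℕ) (mi : ℕ) (hmi : mi + 1 ≤ N - 1)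
    (st : List (List Int) × List (List Int))
    (hdp : pvRep N st.1 (fun p q => if p ≤ mi ∨ q = 0 then pvD a p q else 0))
    (hpc : pvRep N st.2 (fun p q => if p ≤ mi ∨ q = 0 then pvPc p q else 0)) (K : ℕ) (hK : K ≤ N - 1) :
    pvRep N (((PySem.List.pyRange 1 ((K : Int) + 1) 1).foldl (pvStep3Inner a (↑(mi + 1))) st).1)
      (fun p q => if p ≤ mi ∨ q = 0 ∨ (p = mi + 1 ∧ q ≤ K) then pvD a p q else 0) ∧
    pvRep N (((PySem.List.pyRange 1 ((K : Int) + 1) 1).foldl (pvStep3Inner a (↑(mi + 1))) st).2)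
      (fun p q => if p ≤ mi ∨ q = 0 ∨ (p = mi + 1 ∧ q ≤ K) then pvPc p q else 0) := by
  refine pvFoldInv _ (fun k s =>
      pvRep N s.1 (fun p q => if p ≤ mi ∨ q = 0 ∨ (p = mi + 1 ∧ q ≤ k) then pvD a p q else 0) ∧
      pvRep N s.2 (fun p q => if p ≤ mi ∨ q = 0 ∨ (p = mi + 1 ∧ q ≤ k) then pvPc p q else 0))
      st K ?_ ?_ K le_rfl
  · constructor
    · refine pvRep_congr hdp ?_
      intro p q _ _
      have h' : (p ≤ mi ∨ q = 0 ∨ (p = mi + 1 ∧ q ≤ 0)) ↔ (p ≤ mi ∨ q = 0) := by omega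
      simp only [h']
    · refine pvRep_congr hpc ?_
      intro p q _ _
      have h' : (p ≤ mi ∨ q = 0 ∨ (p = mi + 1 ∧ q ≤ 0)) ↔ (p ≤ mi ∨ q = 0) := by omega
      simp only [h']
  · rintro k ⟨sdp, spc⟩ hk ⟨h1, h2⟩
    have hmiN : mi + 1 < N := by omega
    have hk1N : k + 1 < N := by omega
    have e1 : ((k + 1 : ℕ) : Int) - 1 = ((k : ℕ) : Int) := by push_cast; ring
    have e2 : ((mi + 1 : ℕ) : Int) - 1 = ((mi : ℕ) : Int) := by push_cast; ring
    -- the three paths_count reads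
    have hpcA : pvGet2 spc (↑(mi + 1)) (↑(k + 1)) = 0 := by
      rw [pvRep_get h2 rfl rfl hmiN hk1N]
      have : ¬ (mi + 1 ≤ mi ∨ k + 1 = 0 ∨ (mi + 1 = mi + 1 ∧ k + 1 ≤ k)) := by omega
      rw [if_neg this]
    have hpcB : pvGet2 spc (↑(mi + 1)) (((k + 1:ℕ) : Int) - 1) = pvPc (mi + 1) k := by
      rw [pvRep_get h2 rfl e1 hmiN (by omega)]
      have : (mi + 1 ≤ mi ∨ k = 0 ∨ (mi + 1 = mi + 1 ∧ k ≤ k)) := by omega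
      rw [if_pos this]
    have hpcC : pvGet2 spc (((mi + 1:ℕ) : Int) - 1) (↑(k + 1)) = pvPc mi (k + 1) := by
      rw [pvRep_get h2 e2 rfl (by omega) hk1N]
      have : (mi ≤ mi ∨ k + 1 = 0 ∨ (mi = mi + 1 ∧ k + 1 ≤ k)) := by omega
      rw [if_pos this]
    have hpcVal : pvGet2 spc (↑(mi + 1)) (↑(k + 1)) + pvGet2 spc (↑(mi + 1)) (((k + 1:ℕ) : Int) - 1)
        + pvGet2 spc (((mi + 1:ℕ) : Int) - 1) (↑(k + 1)) = pvPc (mi + 1) (k + 1) := by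
      rw [hpcA, hpcB, hpcC]
      simp [pvPc]
    have hpc' := pvRep_set' h2 rfl rfl hmiN hk1N
      (pvGet2 spc (↑(mi + 1)) (↑(k + 1)) + pvGet2 spc (↑(mi + 1)) (((k + 1:ℕ) : Int) - 1)
        + pvGet2 spc (((mi + 1:ℕ) : Int) - 1) (↑(k + 1)))
    -- value stored in pc' at (mi+1, k+1)
    have hpcRead : pvGet2 (pvSet2 spc (↑(mi + 1)) (↑(k + 1))
        (pvGet2 spc (↑(mi + 1)) (↑(k + 1)) + pvGet2 spc (↑(mi + 1)) (((k + 1:ℕ) : Int) - 1)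
          + pvGet2 spc (((mi + 1:ℕ) : Int) - 1) (↑(k + 1)))) (↑(mi + 1)) (↑(k + 1))
        = pvPc (mi + 1) (k + 1) := by
      rw [pvRep_get hpc' rfl rfl hmiN hk1N, if_pos ⟨rfl, rfl⟩, hpcVal]
    -- the three dp reads
    have hdpA : pvGet2 sdp (↑(mi + 1)) (↑(k + 1)) = 0 := by
      rw [pvRep_get h1 rfl rfl hmiN hk1N]
      have : ¬ (mi + 1 ≤ mi ∨ k + 1 = 0 ∨ (mi + 1 = mi + 1 ∧ k + 1 ≤ k)) := by omega
      rw [if_neg this]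
    have hdpB : pvGet2 sdp (↑(mi + 1)) (((k + 1:ℕ) : Int) - 1) = pvD a (mi + 1) k := by
      rw [pvRep_get h1 rfl e1 hmiN (by omega)]
      have : (mi + 1 ≤ mi ∨ k = 0 ∨ (mi + 1 = mi + 1 ∧ k ≤ k)) := by omega
      rw [if_pos this]
    have hdpC : pvGet2 sdp (((mi + 1:ℕ) : Int) - 1) (↑(k + 1)) = pvD a mi (k + 1) := by
      rw [pvRep_get h1 e2 rfl (by omega) hk1N]
      have : (mi ≤ mi ∨ k + 1 = 0 ∨ (mi = mi + 1 ∧ k + 1 ≤ k)) := by omega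
      rw [if_pos this]
    constructor
    · simp only [pvStep3Inner]
      rw [hpcRead, hdpA, hdpB, hdpC, pvGet2_grid a rfl rfl]
      have hval : (0 : Int) + pvG a (mi + 1) (k + 1) * pvPc (mi + 1) (k + 1) + pvD a (mi + 1) k
          + pvD a mi (k + 1) = pvD a (mi + 1) (k + 1) := by
        simp only [pvD]; ring
      rw [hval]
      refine pvRep_congr (pvRep_set' h1 rfl rfl hmiN hk1N _) ?_
      intro p q hp hq
      by_cases hc : p = mi + 1 ∧ q = k + 1
      · obtain ⟨hp1, hq1⟩ := hc; subst hp1; subst hq1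
        have : (mi + 1 ≤ mi ∨ k + 1 = 0 ∨ (mi + 1 = mi + 1 ∧ k + 1 ≤ k + 1)) := by omega
        rw [if_pos ⟨rfl, rfl⟩, if_pos this]
      · have : (p ≤ mi ∨ q = 0 ∨ (p = mi + 1 ∧ q ≤ k + 1)) ↔ (p ≤ mi ∨ q = 0 ∨ (p = mi + 1 ∧ q ≤ k)) := by omega
        simp only [hc, if_false, this]
    · simp only [pvStep3Inner]
      refine pvRep_congr hpc' ?_
      intro p q hp hq
      by_cases hc : p = mi + 1 ∧ q = k + 1
      · obtain ⟨hp1, hq1⟩ := hc; subst hp1; subst hq1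
        have : (mi + 1 ≤ mi ∨ k + 1 = 0 ∨ (mi + 1 = mi + 1 ∧ k + 1 ≤ k + 1)) := by omega
        rw [if_pos ⟨rfl, rfl⟩, hpcVal, if_pos this]
      · have : (p ≤ mi ∨ q = 0 ∨ (p = mi + 1 ∧ q ≤ k + 1)) ↔ (p ≤ mi ∨ q = 0 ∨ (p = mi + 1 ∧ q ≤ k)) := by omega
        simp only [hc, if_false, this]

theorem pvStage3 (a : List (List Int)) (N : ℕ) (hN : 1 ≤ N) (st : List (List Int) × List (List Int))
    (hdp : pvRep N st.1 (fun p q => if p = 0 ∨ q = 0 then pvD a p q else 0))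
    (hpc : pvRep N st.2 (fun p q => if p = 0 ∨ q = 0 then pvPc p q else 0)) (K : ℕ) (hK : K ≤ N - 1) :
    pvRep N (((PySem.List.pyRange 1 ((K : Int) + 1) 1).foldl (pvStep3 a (((N - 1 : ℕ) : Int) + 1)) st).1)
      (fun p q => if p ≤ K ∨ q = 0 then pvD a p q else 0) ∧
    pvRep N (((PySem.List.pyRange 1 ((K : Int) + 1) 1).foldl (pvStep3 a (((N - 1 : ℕ) : Int) + 1)) st).2)
      (fun p q => if p ≤ K ∨ q = 0 then pvPc p q else 0) := by
  refine pvFoldInv _ (fun k s =>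
      pvRep N s.1 (fun p q => if p ≤ k ∨ q = 0 then pvD a p q else 0) ∧
      pvRep N s.2 (fun p q => if p ≤ k ∨ q = 0 then pvPc p q else 0))
      st K ?_ ?_ K le_rfl
  · constructor
    · refine pvRep_congr hdp ?_
      intro p q _ _
      have h' : (p = 0 ∨ q = 0) ↔ (p ≤ 0 ∨ q = 0) := by omega
      simp only [h']
    · refine pvRep_congr hpc ?_
      intro p q _ _
      have h' : (p = 0 ∨ q = 0) ↔ (p ≤ 0 ∨ q = 0) := by omega
      simp only [h']
  · rintro k ⟨sdp, spc⟩ hk ⟨h1, h2⟩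
    have := pvStage3Inner a N k (by omega) (st := (sdp, spc)) h1 h2 (N - 1) le_rfl
    constructor
    · refine pvRep_congr this.1 ?_
      intro p q hp hq
      have h' : (p ≤ k ∨ q = 0 ∨ (p = k + 1 ∧ q ≤ N - 1)) ↔ (p ≤ k + 1 ∨ q = 0) := by omega
      simp only [h']
    · refine pvRep_congr this.2 ?_
      intro p q hp hq
      have h' : (p ≤ k ∨ q = 0 ∨ (p = k + 1 ∧ q ≤ N - 1)) ↔ (p ≤ k + 1 ∨ q = 0) := by omega
      simp only [h']

theorem pvRep_zeros (b : Int) (N : ℕ) (hb : b = ↑N) :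
    pvRep N ((PySem.List.pyRange 0 b 1).map
      (fun _ => (PySem.List.pyRange 0 b 1).map (fun _ => (0 : Int)))) (fun _ _ => 0) := by
  subst hb
  have hlen : ((PySem.List.pyRange 0 (↑N) 1).map
      (fun _ => (PySem.List.pyRange 0 (↑N) 1).map (fun _ => (0 : Int)))).length = N := by
    simp [PySem.List.length_pyRange_one]
  refine ⟨hlen, ?_, ?_⟩
  · intro r hr
    rcases List.mem_map.mp hr with ⟨x, _, hx⟩
    rw [← hx]
    simp [PySem.List.length_pyRange_one]
  · intro p q hp hq
    rw [pvGet2_natCast]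
    rw [List.getD_eq_getElem _ [] (by rw [hlen]; exact hp), List.getElem_map]
    rw [List.getD_eq_getElem _ 0 (by simp [PySem.List.length_pyRange_one]; omega), List.getElem_map]

theorem pvA_eval (n : Int) (a : List (List Int)) (N : ℕ) (hN : 1 ≤ N) (hn : n = (N : Int))
    (ha : ¬ a = []) (hh : ¬ a.headI = []) :
    sum_all_path2D n a = PySem.Int.mod (pvD a (N - 1) (N - 1)) 1000000007 := by
  have hn' : n = ((N - 1 : ℕ) : Int) + 1 := by omega
  have e0 : (0 : Int) = ((0 : ℕ) : Int) := rfl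
  simp only [sum_all_path2D, if_neg ha, if_neg hh]
  rw [hn']
  have hz := pvRep_zeros (((N - 1 : ℕ) : Int) + 1) N (by omega)
  have hga : pvGet2 a 0 0 = pvG a 0 0 := pvGet2_grid a e0 e0
  have hdp1 := pvRep_set' hz e0 e0 (by omega) (by omega) (pvGet2 a 0 0)
  have hdp1' : pvRep N (pvSet2 ((PySem.List.pyRange 0 (((N - 1 : ℕ) : Int) + 1) 1).map
      (fun _ => (PySem.List.pyRange 0 (((N - 1 : ℕ) : Int) + 1) 1).map (fun _ => (0 : Int)))) 0 0 (pvGet2 a 0 0))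
      (fun p q => if p = 0 ∧ q = 0 then pvG a 0 0 else 0) := by
    refine pvRep_congr hdp1 ?_
    intro p q _ _
    rw [hga]
  have h1 := pvStage1 a N hN (st := (_, _)) hdp1' hz (N - 1) le_rfl
  have h2dp := pvRep_congr (g := fun p q => if p = 0 then pvD a 0 q else 0) h1.1 (by
    intro p q hp hq
    beta_reduce
    by_cases h0 : p = 0
    · have : (p = 0 ∧ q ≤ N - 1) := by omega
      rw [if_pos this, if_pos h0]
    · have : ¬ (p = 0 ∧ q ≤ N - 1) := by omega
      rw [if_neg this, if_neg h0])
  have h2pc := pvRep_congr (g := fun p q => if p = 0 ∧ 1 ≤ q then (1:Int) else 0) h1.2 (by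
    intro p q hp hq
    beta_reduce
    have h' : (p = 0 ∧ 1 ≤ q ∧ q ≤ N - 1) ↔ (p = 0 ∧ 1 ≤ q) := by omega
    simp only [h'])
  have h2 := pvStage2 a N hN (st := (_, _)) h2dp h2pc (N - 1) le_rfl
  have h3dp := pvRep_congr (g := fun p q => if p = 0 ∨ q = 0 then pvD a p q else 0) h2.1 (by
    intro p q hp hq
    beta_reduce
    by_cases h0 : p = 0
    · subst h0
      rw [if_pos rfl, if_pos (Or.inl rfl)]
    · by_cases hq0 : q = 0
      · subst hq0
        have : (0 : ℕ) = 0 ∧ p ≤ N - 1 := by omega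
        rw [if_neg h0, if_pos this, if_pos (Or.inr rfl)]
      · have : ¬ ((q = 0 ∧ p ≤ N - 1)) := by omega
        rw [if_neg h0, if_neg this, if_neg (by omega : ¬ (p = 0 ∨ q = 0))])
  have h3pc := pvRep_congr (g := fun p q => if p = 0 ∨ q = 0 then pvPc p q else 0) h2.2 (by
    intro p q hp hq
    beta_reduce
    by_cases h0 : p = 0 ∧ 1 ≤ q
    · rw [if_pos h0, if_pos (Or.inl h0.1)]
      obtain ⟨h0a, h0b⟩ := h0; subst h0a
      cases q with
      | zero => omega
      | succ q' => simp [pvPc]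
    · by_cases hq0 : q = 0
      · subst hq0
        by_cases hp0 : p = 0
        · subst hp0
          rw [if_neg h0, if_neg (by omega : ¬ ((0:ℕ) = 0 ∧ 1 ≤ (0:ℕ) ∧ (0:ℕ) ≤ N - 1)), if_pos (Or.inl rfl)]
          simp [pvPc]
        · rw [if_neg h0, if_pos (by omega : (0:ℕ) = 0 ∧ 1 ≤ p ∧ p ≤ N - 1), if_pos (Or.inr rfl)]
          cases p with
          | zero => omega
          | succ p' => simp [pvPc]
      · rw [if_neg h0, if_neg (by omega : ¬ (q = 0 ∧ 1 ≤ p ∧ p ≤ N - 1)),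
          if_neg (by omega : ¬ (p = 0 ∨ q = 0))])
  have h3 := pvStage3 a N hN (st := (_, _)) h3dp h3pc (N - 1) le_rfl
  have eN1 : ((N - 1 : ℕ) : Int) + 1 - 1 = ((N - 1 : ℕ) : Int) := by ring
  refine congrArg (fun z => PySem.Int.mod z 1000000007) ?_
  exact (pvRep_get h3.1 eN1 eN1 (by omega) (by omega)).trans (if_pos (Or.inl le_rfl))

theorem pvPc_choose : ∀ i j : ℕ, ¬ (i = 0 ∧ j = 0) → pvPc i j = (((i + j).choose i : ℕ) : Int) := by
  intro i
  induction i with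
  | zero =>
    intro j _
    cases j with
    | zero => omega
    | succ j' => simp [pvPc]
  | succ i' ihi =>
    intro j
    induction j with
    | zero => intro _; simp [pvPc]
    | succ j' ihj =>
      intro _
      rw [pvPc]
      rw [ihj (by omega), ihi (j' + 1) (by omega)]
      have : (i' + 1) + (j' + 1) = ((i' + 1) + j') + 1 := by omega
      rw [this]
      have : i' + (j' + 1) = (i' + 1) + j' := by omega
      rw [this]
      rw [Nat.choose_succ_succ ((i' + 1) + j') i']
      push_cast
      ring

theorem pvKey (i j p q : ℕ) (hp : p < i + 2) (hq : q < j + 2) :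
    ((i+1-p)+(j+1-q)).choose (i+1-p)
      = (if q ≤ j then ((i+1-p)+(j-q)).choose (i+1-p) else 0)
      + (if p ≤ i then ((i-p)+(j+1-q)).choose (i-p) else 0)
      + (if p = i+1 ∧ q = j+1 then 1 else 0) := by
  by_cases hpc : p ≤ i
  · by_cases hqc : q ≤ j
    · rw [if_pos hqc, if_pos hpc, if_neg (by omega)]
      have e1 : i + 1 - p = (i - p) + 1 := by omega
      have e2 : j + 1 - q = (j - q) + 1 := by omega
      have e3 : j - q + 1 = (j + 1) - q := by omega
      rw [e1, e2]
      have r1 : (i - p + 1) + (j - q) = (i - p) + (j - q) + 1 := by omega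
      have r2 : (i - p) + (j - q + 1) = (i - p) + (j - q) + 1 := by omega
      have e4 : (i - p + 1) + (j - q + 1) = ((i - p) + (j - q) + 1) + 1 := by omega
      rw [r1, r2, e4, Nat.choose_succ_succ ((i - p) + (j - q) + 1) (i - p)]
      ring
    · have hq1 : q = j + 1 := by omega
      subst hq1
      rw [if_neg (by omega), if_pos hpc, if_neg (by omega)]
      have e1 : j + 1 - (j + 1) = 0 := by omega
      rw [e1]
      simp
  · have hp1 : p = i + 1 := by omega
    subst hp1
    have e1 : i + 1 - (i + 1) = 0 := by omega
    rw [e1]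
    by_cases hqc : q ≤ j
    · rw [if_pos hqc, if_neg (by omega), if_neg (by omega)]
      simp
    · have hq1 : q = j + 1 := by omega
      subst hq1
      rw [if_neg (by omega), if_neg (by omega), if_pos ⟨rfl, rfl⟩]
      simp

theorem pvSumIf_q (m n : ℕ) (g : ℕ → ℕ → Int) :
    (∑ p ∈ Finset.range m, ∑ q ∈ Finset.range (n + 2), if q ≤ n then g p q else 0)
      = ∑ p ∈ Finset.range m, ∑ q ∈ Finset.range (n + 1), g p q := by
  refine Finset.sum_congr rfl (fun p _ => ?_)
  rw [Finset.sum_range_succ, if_neg (by omega), add_zero]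
  exact Finset.sum_congr rfl (fun q hq => if_pos (by rw [Finset.mem_range] at hq; omega))

theorem pvSumIf_p (m n : ℕ) (g : ℕ → ℕ → Int) :
    (∑ p ∈ Finset.range (m + 2), ∑ q ∈ Finset.range n, if p ≤ m then g p q else 0)
      = ∑ p ∈ Finset.range (m + 1), ∑ q ∈ Finset.range n, g p q := by
  rw [Finset.sum_range_succ, Finset.sum_eq_zero (fun q _ => if_neg (by omega)), add_zero]
  exact Finset.sum_congr rfl (fun p hp => Finset.sum_congr rfl
    (fun q _ => if_pos (by rw [Finset.mem_range] at hp; omega)))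

theorem pvSumIf_corner (m n : ℕ) (g : ℕ → ℕ → Int) :
    (∑ p ∈ Finset.range (m + 2), ∑ q ∈ Finset.range (n + 2), if p = m + 1 ∧ q = n + 1 then g p q else 0)
      = g (m + 1) (n + 1) := by
  rw [Finset.sum_range_succ,
    Finset.sum_eq_zero (fun p hp => Finset.sum_eq_zero
      (fun q _ => if_neg (by rw [Finset.mem_range] at hp; omega))), zero_add,
    Finset.sum_range_succ,
    Finset.sum_eq_zero (fun q hq => if_neg (by rw [Finset.mem_range] at hq; omega)), zero_add,
    if_pos ⟨rfl, rfl⟩]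

theorem pvD_closed (a : List (List Int)) : ∀ i j : ℕ,
    pvD a i j = ∑ p ∈ Finset.range (i + 1), ∑ q ∈ Finset.range (j + 1),
      pvG a p q * (((p + q).choose p : ℕ) : Int) * ((((i - p) + (j - q)).choose (i - p) : ℕ) : Int) := by
  intro i
  induction i with
  | zero =>
    intro j
    induction j with
    | zero => simp [pvD]
    | succ j' ihj =>
      rw [show pvD a 0 (j' + 1) = pvD a 0 j' + pvG a 0 (j' + 1) from by rw [pvD]]
      rw [ihj]
      rw [Finset.sum_range_one, Finset.sum_range_one]
      rw [Finset.sum_range_succ _ (j' + 1)]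
      simp [Nat.choose_zero_right]
  | succ i' ihi =>
    intro j
    induction j with
    | zero =>
      rw [show pvD a (i' + 1) 0 = pvD a i' 0 + pvG a (i' + 1) 0 from by rw [pvD]]
      rw [ihi 0]
      simp only [Nat.zero_add, Finset.sum_range_one, Nat.add_zero]
      rw [Finset.sum_range_succ _ (i' + 1)]
      simp [Nat.choose_self]
    | succ j' ihj =>
      rw [show pvD a (i' + 1) (j' + 1)
          = pvG a (i' + 1) (j' + 1) * pvPc (i' + 1) (j' + 1) + pvD a (i' + 1) j' + pvD a i' (j' + 1) from by rw [pvD]]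
      rw [ihj, ihi (j' + 1), pvPc_choose (i' + 1) (j' + 1) (by omega)]
      have key : ∀ p ∈ Finset.range (i' + 2), ∀ q ∈ Finset.range (j' + 2),
          pvG a p q * (((p + q).choose p : ℕ) : Int) * ((((i' + 1 - p) + (j' + 1 - q)).choose (i' + 1 - p) : ℕ) : Int)
          = (if q ≤ j' then pvG a p q * (((p + q).choose p : ℕ) : Int) * ((((i' + 1 - p) + (j' - q)).choose (i' + 1 - p) : ℕ) : Int) else 0)
          + (if p ≤ i' then pvG a p q * (((p + q).choose p : ℕ) : Int) * ((((i' - p) + (j' + 1 - q)).choose (i' - p) : ℕ) : Int) else 0)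
          + (if p = i' + 1 ∧ q = j' + 1 then pvG a p q * (((p + q).choose p : ℕ) : Int) else 0) := by
        intro p hp q hq
        rw [Finset.mem_range] at hp hq
        rw [pvKey i' j' p q hp hq]
        push_cast
        split_ifs <;> ring
      rw [Finset.sum_congr rfl (fun p hp => Finset.sum_congr rfl (fun q hq => key p hp q hq))]
      simp only [Finset.sum_add_distrib]
      rw [pvSumIf_q (i' + 2) j' _, pvSumIf_p i' (j' + 2) _, pvSumIf_corner i' j' _]
      ring

theorem pvFact_eval (K : ℕ) :
    (PySem.List.pyRange 0 (K : Int) 1).foldl pvFactStep [(1 : Int)]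
      = (List.range (K + 1)).map (fun t => ((t.factorial : ℕ) : Int)) := by
  refine pvFoldInv0 pvFactStep (fun k l => l = (List.range (k + 1)).map (fun t => ((t.factorial : ℕ) : Int)))
    [(1 : Int)] K ?_ ?_ K le_rfl
  · simp [List.range_succ]
  · intro k s _ hs
    subst hs
    rw [pvFactStep, show (List.range (k + 1)) = List.range k ++ [k] from List.range_succ,
      List.map_append]
    simp only [List.map_cons, List.map_nil]
    rw [PySem.List.pyGetD_neg_one_append_singleton]
    rw [show List.range (k + 1 + 1) = List.range (k + 1) ++ [k + 1] from List.range_succ,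
      List.map_append, show (List.range (k + 1)) = List.range k ++ [k] from List.range_succ,
      List.map_append]
    simp only [List.map_cons, List.map_nil, List.append_assoc, List.cons_append, List.nil_append]
    congr 2
    rw [Nat.factorial_succ]
    push_cast
    ring_nf

theorem pvComb_eval (b c : ℕ) :
    PySem.Int.floordiv (((b + c).factorial : ℕ) : Int) (((b.factorial : ℕ) : Int) * ((c.factorial : ℕ) : Int))
      = (((b + c).choose b : ℕ) : Int) := by
  have h : (((b + c).factorial : ℕ) : Int)
      = (((b + c).choose b : ℕ) : Int) * (((b.factorial : ℕ) : Int) * ((c.factorial : ℕ) : Int)) := by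
    have := Nat.choose_mul_factorial_mul_factorial (Nat.le_add_right b c)
    rw [show b + c - b = c from by omega] at this
    push_cast [← this]
    ring
  rw [h, PySem.Int.floordiv_eq_ediv_of_pos (by positivity)]
  exact Int.mul_ediv_cancel _ (by positivity)

theorem pvListSum_toFinset (K : ℕ) (f : ℕ → Int) :
    ((List.range K).map f).sum = ∑ i ∈ Finset.range K, f i := rfl

theorem pvB_eval (n : Int) (a : List (List Int)) (N : ℕ) (hN : 1 ≤ N) (hn : n = (N : Int))
    (ha : ¬ a = []) (hh : ¬ a.headI = []) :
    sum_all_path2D_alt n a = PySem.Int.mod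
      (∑ p ∈ Finset.range N, ∑ q ∈ Finset.range N,
        pvG a p q * (((p + q).choose p : ℕ) : Int)
          * ((((N - 1 - p) + (N - 1 - q)).choose (N - 1 - p) : ℕ) : Int))
      1000000007 := by
  subst hn
  simp only [sum_all_path2D_alt, if_neg ha, if_neg hh]
  have hf2 : 2 * (N : Int) - 2 = ((2 * N - 2 : ℕ) : Int) := by omega
  rw [hf2, pvFact_eval (2 * N - 2)]
  have hlook : ∀ x : ℕ, x ≤ 2 * N - 2 →
      PySem.List.pyGetD ((List.range (2 * N - 2 + 1)).map (fun t => ((t.factorial : ℕ) : Int))) (↑x) 0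
        = ((x.factorial : ℕ) : Int) := by
    intro x hx
    rw [PySem.List.pyGetD_natCast]
    rw [List.getD_eq_getElem _ 0 (by
      simp only [List.length_map, List.length_range]; omega), List.getElem_map, List.getElem_range]
  rw [PySem.List.pyRange_zero_natCast]
  simp only [List.foldl_map]
  simp only [PySem.List.foldl_add]
  simp only [zero_add, pvListSum_toFinset]
  refine congrArg (fun z => PySem.Int.mod z 1000000007) ?_
  refine Finset.sum_congr rfl (fun p hp => ?_)
  rw [Finset.mem_range] at hp
  refine Finset.sum_congr rfl (fun q hq => ?_)
  rw [Finset.mem_range] at hq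
  have c1 : ((p : Int) + (q : Int)) = ((p + q : ℕ) : Int) := by push_cast; ring
  have c2 : 2 * ((N : Int) - 1) - (p : Int) - (q : Int) = (((N - 1 - p) + (N - 1 - q) : ℕ) : Int) := by
    push_cast; omega
  have c3 : (N : Int) - 1 - (p : Int) = ((N - 1 - p : ℕ) : Int) := by omega
  have c4 : (N : Int) - 1 - (q : Int) = ((N - 1 - q : ℕ) : Int) := by omega
  rw [c1, c2, c3, c4, hlook (p + q) (by omega), hlook p (by omega), hlook q (by omega),
    hlook ((N - 1 - p) + (N - 1 - q)) (by omega), hlook (N - 1 - p) (by omega),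
    hlook (N - 1 - q) (by omega), pvComb_eval p q, pvComb_eval (N - 1 - p) (N - 1 - q),
    pvGet2_grid a rfl rfl]

theorem sum_all_path2D_spec' : ∀ (n : Int) (a : List (List Int)),
    Pre_sum_all_path2D n a → sum_all_path2D n a = sum_all_path2D_alt n a := by
  intro n a hpre
  by_cases ha : a = []
  · simp [sum_all_path2D, sum_all_path2D_alt, ha]
  by_cases hh : a.headI = []
  · simp [sum_all_path2D, sum_all_path2D_alt, ha, hh]
  have hn1 : 1 ≤ n := by
    rcases hpre with h | h | ⟨h1, _, _⟩
    · exact absurd h ha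
    · exact absurd h hh
    · exact h1
  have hn : n = ((n.toNat : ℕ) : Int) := by omega
  have hN : 1 ≤ n.toNat := by omega
  rw [pvA_eval n a n.toNat hN hn ha hh, pvB_eval n a n.toNat hN hn ha hh]
  refine congrArg (fun z => PySem.Int.mod z 1000000007) ?_
  refine (pvD_closed a (n.toNat - 1) (n.toNat - 1)).trans ?_
  rw [Nat.sub_add_cancel hN]

-- ===== VERDICT (by name: the statement is the Claim_ definition above) =====
theorem sum_all_path2D_spec : Claim_equal_sum_all_path2D := by
  intro n a _ hpre
  exact sum_all_path2D_spec' n a hpre
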